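-- pv_equiv track=rewrite | github.com/EliBildman/PoemGenerator | poemCreator.py | space_pad
-- ===== SOURCE A (Python) =====
-- PUNC = ',.?!-'
--
-- def space_pad(s):
--     i = 0
--     while i < len(s):
--         if s[i] in PUNC:
--             s = s[:i] + ' ' + s[i] + ' ' + s[i+1:]
--             i += 3
--         else:
--             i += 1
--     return s
-- ===== SOURCE B (Python) =====
-- PUNC = ',.?!-'
--
-- def space_pad(s):
--     # single pass: emit each char, punctuation surrounded by spaces
--     return ''.join(' ' + c + ' ' if c in PUNC else c for c in s)
-- ===== Notes on version B (the rewrite author's own statement) =====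
-- stated objective: faster
-- what changed: Replaced the index-walk that rebuilds the string by slicing at each punctuation char with a single-pass join emitting each character (space-padded when it is punctuation).
import Mathlib
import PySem

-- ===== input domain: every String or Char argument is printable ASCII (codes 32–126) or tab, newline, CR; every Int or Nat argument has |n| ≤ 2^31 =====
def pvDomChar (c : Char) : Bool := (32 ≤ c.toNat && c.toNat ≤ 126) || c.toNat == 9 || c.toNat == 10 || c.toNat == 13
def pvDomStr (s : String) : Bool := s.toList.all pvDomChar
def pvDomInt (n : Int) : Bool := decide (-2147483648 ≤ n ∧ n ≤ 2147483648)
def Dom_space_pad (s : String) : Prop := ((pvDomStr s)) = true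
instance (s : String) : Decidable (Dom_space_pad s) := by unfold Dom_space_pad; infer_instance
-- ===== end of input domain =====

-- B replaces A's index-walk with repeated slicing/reassembly by a single pass emitting each char (space-padded when punctuation); objective: simpler.


-- ===== PORT A =====
def PUNC : List Char := [',', '.', '?', '!', '-']

-- A's while loop over (s, i); slices s[:i], s[i+1:] with 0 ≤ i ≤ len s are exactly take/drop.
def spLoop (s : List Char) (i : Nat) : List Char :=
  if h : i < s.length then
    let c := s.get ⟨i, h⟩
    if c ∈ PUNC then
      spLoop (s.take i ++ ' ' :: c :: ' ' :: s.drop (i+1)) (i+3)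
    else
      spLoop s (i+1)
  else s
termination_by s.length - i
decreasing_by
  · simp only [List.length_append, List.length_take, List.length_cons, List.length_drop]
    omega
  · omega

def space_pad (s : String) : String := String.mk (spLoop s.toList 0)

-- ===== PORT B =====
def space_pad_alt (s : String) : String :=
  String.mk (s.toList.flatMap (fun c => if c ∈ PUNC then [' ', c, ' '] else [c]))

-- ===== PRECONDITION & SPEC =====
def Spec_space_pad (s : String) (out : String) : Prop := out = space_pad_alt s
instance (s : String) (out : String) : Decidable (Spec_space_pad s out) := by unfold Spec_space_pad; infer_instance

-- ===== CLAIM (what is proved, stated in full; the proofs are below) =====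
def Claim_equal_space_pad : Prop := ∀ (s : String), Dom_space_pad s → Spec_space_pad s (space_pad s)

-- ===== LEMMAS AND PROOFS =====

theorem spLoop_eq (rest done : List Char) :
    spLoop (done ++ rest) done.length
      = done ++ rest.flatMap (fun c => if c ∈ PUNC then [' ', c, ' '] else [c]) := by
  induction rest generalizing done with
  | nil => rw [spLoop]; simp
  | cons c rs ih =>
    rw [spLoop]
    have h : done.length < (done ++ c :: rs).length := by simp
    rw [dif_pos h]
    have hget : (done ++ c :: rs).get ⟨done.length, h⟩ = c := by
      simp [List.get_eq_getElem, List.getElem_append_right]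
    have htake : (done ++ c :: rs).take done.length = done := by
      simp
    have hdrop : (done ++ c :: rs).drop (done.length + 1) = rs := by
      rw [show done.length + 1 = done.length + 1 from rfl, List.drop_append]
      simp
    by_cases hc : c ∈ PUNC
    · simp only [hget, if_pos hc, htake, hdrop]
      have h3 : done.length + 3 = (done ++ [' ', c, ' ']).length := by simp
      have hl : done ++ ' ' :: c :: ' ' :: rs = (done ++ [' ', c, ' ']) ++ rs := by simp
      rw [hl, h3, ih (done ++ [' ', c, ' '])]
      simp [hc]
    · simp only [hget, if_neg hc]
      have h1 : done.length + 1 = (done ++ [c]).length := by simp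
      have hl : done ++ c :: rs = (done ++ [c]) ++ rs := by simp
      rw [hl, h1, ih (done ++ [c])]
      simp [hc]

-- ===== VERDICT (by name: the statement is the Claim_ definition above) =====
theorem space_pad_spec : Claim_equal_space_pad := by
  intro s _
  unfold Spec_space_pad space_pad space_pad_alt
  have := spLoop_eq s.toList []
  simp only [List.nil_append, List.length_nil] at this
  rw [this]
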